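-- pv_equiv track=rewrite | github.com/Arsapol/agent-npa-guy | workspace/skills/led-scraper/scripts/main.py | determine_sale_status
-- ===== SOURCE A (Python) =====
-- from typing import Any, Dict, List, Optional
--
-- def determine_sale_status(issale_values: List[str]) -> tuple[str, Optional[int]]:
--     """Determine overall sale status from issale1-8 values and return (status, latest_auction_number)"""
--     # Priority order: sold (1) > withdrawn (6) > not sold yet (0) > cancelled no bidders (3) > cancelled (10)
--
--     # Track found statuses with priority levels
--     priority = {
--         "1": (1, "ขายแล้ว"),
--         "6": (2, "ถอนการยึด"),
--         "0": (3, "ยังไม่ขาย"),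
--         "3": (4, "งดขายไม่มีผู้สู้ราคา"),
--         "10": (5, "งดขาย"),
--     }
--
--     highest_priority = float("inf")
--     status = "unknown"
--     latest_auction_number = None
--     first_unknown = None
--     first_unknown_index = None
--
--     # Single pass through the list with index tracking
--     # For same priority, keep the LATEST (highest) auction number
--     for index, value in enumerate(issale_values, start=1):
--         if value in priority:
--             prio, label = priority[value]
--             if prio < highest_priority:
--                 # Found higher priority status
--                 highest_priority = prio
--                 status = label
--                 latest_auction_number = index
--             elif prio == highest_priority:
--                 # Same priority - keep the latest (higher) auction number
--                 latest_auction_number = index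
--         elif value and value.strip() and first_unknown is None:
--             first_unknown = value
--             first_unknown_index = index
--
--     # Return highest priority status found, or first unknown value, or "unknown"
--     if highest_priority != float("inf"):
--         return status, latest_auction_number
--     elif first_unknown:
--         return first_unknown, first_unknown_index
--     else:
--         return "unknown", None
-- ===== SOURCE B (Python) =====
-- def determine_sale_status(issale_values):
--     """Determine overall sale status from issale1-8 values and return (status, latest_auction_number)"""
--     priority = [
--         ("1", "ขายแล้ว"),
--         ("6", "ถอนการยึด"),
--         ("0", "ยังไม่ขาย"),
--         ("3", "งดขายไม่มีผู้สู้ราคา"),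
--         ("10", "งดขาย"),
--     ]
--     for key, label in priority:
--         indices = [i for i, v in enumerate(issale_values, 1) if v == key]
--         if indices:
--             return label, max(indices)
--     for i, v in enumerate(issale_values, 1):
--         if v and v.strip():
--             return v, i
--     return "unknown", None
-- ===== Notes on version B (the rewrite author's own statement) =====
-- stated objective: simpler
-- what changed: Replaces the single min-priority-tracking pass with five heavy state variables by priority-ordered scans: for each status key in priority order return (label, max(1-based indices of that key)); fall back to the first truthy non-blank value, else ('unknown', None).
import Mathlib
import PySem

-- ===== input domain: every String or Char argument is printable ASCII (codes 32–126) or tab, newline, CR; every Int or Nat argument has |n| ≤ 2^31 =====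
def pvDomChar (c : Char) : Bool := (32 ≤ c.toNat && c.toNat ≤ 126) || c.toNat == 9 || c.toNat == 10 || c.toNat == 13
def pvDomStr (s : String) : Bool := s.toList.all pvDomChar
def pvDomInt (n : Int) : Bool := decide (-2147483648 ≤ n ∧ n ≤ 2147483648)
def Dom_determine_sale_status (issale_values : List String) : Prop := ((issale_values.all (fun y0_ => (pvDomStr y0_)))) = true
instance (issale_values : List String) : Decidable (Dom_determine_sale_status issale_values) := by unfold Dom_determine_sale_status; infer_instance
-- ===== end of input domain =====

-- B replaces A's single min-tracking pass by priority-ordered scans (simpler control flow); equal return value proved on all inputs.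

-- ===== PORT A =====
-- A's `priority` dict
def pvPriority : PySem.Dict String (Int × String) :=
  PySem.Dict.ofList [("1", (1, "ขายแล้ว")), ("6", (2, "ถอนการยึด")), ("0", (3, "ยังไม่ขาย")),
                     ("3", (4, "งดขายไม่มีผู้สู้ราคา")), ("10", (5, "งดขาย"))]

-- A's for-loop over enumerate(issale_values, 1); hp = none plays float("inf")
def pvLoopA (idx : Int) (hp : Option Int) (status : String) (lat : Option Int)
    (fu : Option String) (fui : Option Int) : List String → String × Option Int
  | [] =>
      if hp.isSome then (status, lat)
      else match fu with
        | some s => if s ≠ "" then (s, fui) else ("unknown", none)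
        | none => ("unknown", none)
  | v :: rest =>
      match pvPriority.get? v with
      | some (p, label) =>
          match hp with
          | some h =>
              if p < h then pvLoopA (idx + 1) (some p) label (some idx) fu fui rest
              else if p = h then pvLoopA (idx + 1) hp status (some idx) fu fui rest
              else pvLoopA (idx + 1) hp status lat fu fui rest
          | none => pvLoopA (idx + 1) (some p) label (some idx) fu fui rest
      | none =>
          if v ≠ "" ∧ PySem.Str.strip v ≠ "" ∧ fu = none
          then pvLoopA (idx + 1) hp status lat (some v) (some idx) rest
          else pvLoopA (idx + 1) hp status lat fu fui rest

def determine_sale_status (issale_values : List String) : String × Option Int :=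
  pvLoopA 1 none "unknown" none none none issale_values

-- ===== PORT B =====
-- [i for i, v in enumerate(issale_values, 1) if v == key]
def pvKeyIdxs (idx : Int) (key : String) : List String → List Int
  | [] => []
  | v :: rest => if v = key then idx :: pvKeyIdxs (idx + 1) key rest else pvKeyIdxs (idx + 1) key rest

-- second loop of B: first truthy, non-blank value with its 1-based index
def pvFirstUnknown (idx : Int) : List String → Option (String × Int)
  | [] => none
  | v :: rest => if v ≠ "" ∧ PySem.Str.strip v ≠ "" then some (v, idx) else pvFirstUnknown (idx + 1) rest

-- first loop of B: keys in priority order; `if indices: return label, max(indices)`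
def pvTryKeys (xs : List String) : List (String × String) → Option (String × Int)
  | [] => none
  | (key, label) :: ks =>
      match PySem.List.max? (pvKeyIdxs 1 key xs) (fun i => i) with
      | some m => some (label, m)
      | none => pvTryKeys xs ks

def determine_sale_status_alt (issale_values : List String) : String × Option Int :=
  match pvTryKeys issale_values
      [("1", "ขายแล้ว"), ("6", "ถอนการยึด"), ("0", "ยังไม่ขาย"),
       ("3", "งดขายไม่มีผู้สู้ราคา"), ("10", "งดขาย")] with
  | some (l, m) => (l, some m)
  | none =>
      match pvFirstUnknown 1 issale_values with
      | some (v, i) => (v, some i)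
      | none => ("unknown", none)

-- ===== PRECONDITION & SPEC =====
def Spec_determine_sale_status (issale_values : List String) (out : String × Option Int) : Prop := out = determine_sale_status_alt issale_values
instance (issale_values : List String) (out : String × Option Int) : Decidable (Spec_determine_sale_status issale_values out) := by unfold Spec_determine_sale_status; infer_instance

-- ===== CLAIM (what is proved, stated in full; the proofs are below) =====
def Claim_equal_determine_sale_status : Prop := ∀ (issale_values : List String), Dom_determine_sale_status issale_values → Spec_determine_sale_status issale_values (determine_sale_status issale_values)

-- ===== LEMMAS AND PROOFS =====

-- the five (priority, label) pairs
def pvPairs : List (Int × String) :=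
  [(1, "ขายแล้ว"), (2, "ถอนการยึด"), (3, "ยังไม่ขาย"), (4, "งดขายไม่มีผู้สู้ราคา"), (5, "งดขาย")]

lemma pvGet_char (v : String) :
    pvPriority.get? v =
      (if v = "1" then some ((1 : Int), "ขายแล้ว")
       else if v = "6" then some (2, "ถอนการยึด")
       else if v = "0" then some (3, "ยังไม่ขาย")
       else if v = "3" then some (4, "งดขายไม่มีผู้สู้ราคา")
       else if v = "10" then some (5, "งดขาย")
       else none) := by
  simp [pvPriority, PySem.Dict.ofList, PySem.Dict.update, PySem.Dict.get?_insert]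
  split_ifs <;> simp_all

lemma pvGet_mem {v : String} {pr : Int × String} (h : pvPriority.get? v = some pr) : pr ∈ pvPairs := by
  rw [pvGet_char] at h
  split_ifs at h <;> simp_all [pvPairs]

lemma pvLabel_inj {p : Int} {l l' : String} (h : (p, l) ∈ pvPairs) (h' : (p, l') ∈ pvPairs) : l = l' := by
  simp only [pvPairs, List.mem_cons, List.not_mem_nil, or_false, Prod.mk.injEq] at h h'
  rcases h with ⟨h1, h2⟩ | ⟨h1, h2⟩ | ⟨h1, h2⟩ | ⟨h1, h2⟩ | ⟨h1, h2⟩ <;>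
    rcases h' with ⟨h1', h2'⟩ | ⟨h1', h2'⟩ | ⟨h1', h2'⟩ | ⟨h1', h2'⟩ | ⟨h1', h2'⟩ <;>
      subst_vars <;> first | rfl | omega

-- summary of A's loop over a suffix: minimal-priority entry with its latest index
def pvBest (idx : Int) : List String → Option (Int × String × Int)
  | [] => none
  | v :: rest =>
      match pvPriority.get? v, pvBest (idx + 1) rest with
      | some (p, l), some (q, l', j) => if p < q then some (p, l, idx) else some (q, l', j)
      | some (p, l), none => some (p, l, idx)
      | none, b => b

-- first truthy non-blank value that is NOT a priority key (what A records as first_unknown)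
def pvFU (idx : Int) : List String → Option (String × Int)
  | [] => none
  | v :: rest =>
      if pvPriority.get? v = none ∧ v ≠ "" ∧ PySem.Str.strip v ≠ ""
      then some (v, idx) else pvFU (idx + 1) rest

-- final return of A as a function of the incoming state and the suffix summary
def pvFinish (hp : Option Int) (status : String) (lat : Option Int) (fu : Option String) (fui : Option Int)
    (b : Option (Int × String × Int)) (u : Option (String × Int)) : String × Option Int :=
  match b with
  | some (p, l, m) =>
      match hp with
      | some h => if p < h then (l, some m) else if p = h then (status, some m) else (status, lat)
      | none => (l, some m)
  | none =>
      match hp with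
      | some _ => (status, lat)
      | none =>
        match fu with
        | some s => if s ≠ "" then (s, fui) else ("unknown", none)
        | none =>
          match u with
          | some (v, i) => (v, some i)
          | none => ("unknown", none)

lemma pvBest_mem : ∀ (xs : List String) (idx : Int) {p : Int} {l : String} {j : Int},
    pvBest idx xs = some (p, l, j) → (p, l) ∈ pvPairs := by
  intro xs
  induction xs with
  | nil => intro idx p l j h; simp [pvBest] at h
  | cons v rest ih =>
    intro idx p l j h
    rw [pvBest] at h
    cases hg : pvPriority.get? v with
    | none => rw [hg] at h; exact ih _ h
    | some pr =>
      obtain ⟨pp, ll⟩ := pr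
      rw [hg] at h
      cases hb : pvBest (idx + 1) rest with
      | none =>
        rw [hb] at h
        dsimp only at h
        simp only [Option.some.injEq, Prod.mk.injEq] at h
        obtain ⟨rfl, rfl, -⟩ := h
        exact pvGet_mem hg
      | some b =>
        obtain ⟨q, l', j'⟩ := b
        rw [hb] at h
        dsimp only at h
        by_cases hpq : pp < q
        · rw [if_pos hpq] at h
          simp only [Option.some.injEq, Prod.mk.injEq] at h
          obtain ⟨rfl, rfl, -⟩ := h
          exact pvGet_mem hg
        · rw [if_neg hpq] at h
          simp only [Option.some.injEq, Prod.mk.injEq] at h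
          obtain ⟨rfl, rfl, -⟩ := h
          exact ih _ hb

lemma pvLoopA_eq : ∀ (xs : List String) (idx : Int) (hp : Option Int) (status : String)
    (lat : Option Int) (fu : Option String) (fui : Option Int),
    (∀ h, hp = some h → (h, status) ∈ pvPairs) →
    pvLoopA idx hp status lat fu fui xs = pvFinish hp status lat fu fui (pvBest idx xs) (pvFU idx xs) := by
  intro xs
  induction xs with
  | nil =>
    intro idx hp status lat fu fui _
    cases hp <;> cases fu <;> rfl
  | cons v rest ih =>
    intro idx hp status lat fu fui hinv
    rw [pvLoopA, pvBest, pvFU]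
    cases hg : pvPriority.get? v with
    | some pr =>
      obtain ⟨p, l⟩ := pr
      have hmem : (p, l) ∈ pvPairs := pvGet_mem hg
      dsimp only
      rw [if_neg (show ¬((some (p, l) : Option (Int × String)) = none ∧ v ≠ "" ∧ PySem.Str.strip v ≠ "") from by simp)]
      cases hp with
      | none =>
        rw [ih (idx + 1) (some p) l (some idx) fu fui (by rintro h ⟨rfl⟩; exact hmem)]
        cases hb : pvBest (idx + 1) rest with
        | none => rfl
        | some b =>
          obtain ⟨q, l', j⟩ := b
          have hmem' : (q, l') ∈ pvPairs := pvBest_mem rest (idx + 1) hb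
          dsimp only
          by_cases hq1 : q < p
          · rw [if_neg (by omega : ¬ p < q)]
            simp only [pvFinish]
            split_ifs; rfl
          · by_cases hq2 : q = p
            · have hl : l = l' := pvLabel_inj (show (q, l) ∈ pvPairs by rwa [hq2]) hmem'
              rw [if_neg (by omega : ¬ p < q)]
              simp only [pvFinish]
              split_ifs <;> first | rfl | rw [hl]
            · rw [if_pos (by omega : p < q)]
              simp only [pvFinish]
              split_ifs; rfl
      | some h =>
        dsimp only
        by_cases h1 : p < h
        · rw [if_pos h1]
          rw [ih (idx + 1) (some p) l (some idx) fu fui (by rintro h' ⟨rfl⟩; exact hmem)]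
          cases hb : pvBest (idx + 1) rest with
          | none => simp only [pvFinish]; rw [if_pos h1]
          | some b =>
            obtain ⟨q, l', j⟩ := b
            have hmem' : (q, l') ∈ pvPairs := pvBest_mem rest (idx + 1) hb
            dsimp only
            by_cases hq1 : q < p
            · rw [if_neg (by omega : ¬ p < q)]
              simp only [pvFinish]
              split_ifs <;> first | rfl | (exfalso; omega)
            · by_cases hq2 : q = p
              · have hl : l = l' := pvLabel_inj (show (q, l) ∈ pvPairs by rwa [hq2]) hmem'
                rw [if_neg (by omega : ¬ p < q)]
                simp only [pvFinish]
                split_ifs <;> first | rfl | (exfalso; omega) | rw [hl]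
              · rw [if_pos (by omega : p < q)]
                simp only [pvFinish]
                split_ifs; rfl
        · rw [if_neg h1]
          by_cases h2 : p = h
          · rw [if_pos h2]
            rw [ih (idx + 1) (some h) status (some idx) fu fui hinv]
            cases hb : pvBest (idx + 1) rest with
            | none => simp only [pvFinish]; rw [if_neg h1, if_pos h2]
            | some b =>
              obtain ⟨q, l', j⟩ := b
              dsimp only
              by_cases hq1 : q < p
              · rw [if_neg (by omega : ¬ p < q)]
                simp only [pvFinish]
                split_ifs <;> first | rfl | (exfalso; omega)
              · by_cases hq2 : q = p
                · rw [if_neg (by omega : ¬ p < q)]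
                  simp only [pvFinish]
                  split_ifs <;> first | rfl | (exfalso; omega)
                · rw [if_pos (by omega : p < q)]
                  simp only [pvFinish]
                  split_ifs <;> first | rfl | (exfalso; omega)
          · rw [if_neg h2]
            rw [ih (idx + 1) (some h) status lat fu fui hinv]
            cases hb : pvBest (idx + 1) rest with
            | none => simp only [pvFinish]; rw [if_neg h1, if_neg h2]
            | some b =>
              obtain ⟨q, l', j⟩ := b
              dsimp only
              by_cases hq1 : q < p
              · rw [if_neg (by omega : ¬ p < q)]
              · by_cases hq2 : q = p
                · rw [if_neg (by omega : ¬ p < q)]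
                · rw [if_pos (by omega : p < q)]
                  simp only [pvFinish]
                  split_ifs <;> first | rfl | (exfalso; omega)
    | none =>
      dsimp only
      by_cases hc : v ≠ "" ∧ PySem.Str.strip v ≠ ""
      · cases fu with
        | none =>
          rw [if_pos (show v ≠ "" ∧ PySem.Str.strip v ≠ "" ∧ (none : Option String) = none from ⟨hc.1, hc.2, rfl⟩),
              if_pos (show (none : Option (Int × String)) = none ∧ v ≠ "" ∧ PySem.Str.strip v ≠ "" from ⟨rfl, hc.1, hc.2⟩)]
          rw [ih (idx + 1) hp status lat (some v) (some idx) hinv]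
          cases hp with
          | none =>
            cases hb : pvBest (idx + 1) rest with
            | none => simp [pvFinish, hc.1]
            | some b => obtain ⟨q, l', j⟩ := b; rfl
          | some h =>
            cases hb : pvBest (idx + 1) rest with
            | none => rfl
            | some b => obtain ⟨q, l', j⟩ := b; rfl
        | some s =>
          rw [if_neg (show ¬(v ≠ "" ∧ PySem.Str.strip v ≠ "" ∧ (some s : Option String) = none) from by simp),
              if_pos (show (none : Option (Int × String)) = none ∧ v ≠ "" ∧ PySem.Str.strip v ≠ "" from ⟨rfl, hc.1, hc.2⟩)]
          rw [ih (idx + 1) hp status lat (some s) fui hinv]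
          cases hp with
          | none =>
            cases hb : pvBest (idx + 1) rest with
            | none => rfl
            | some b => obtain ⟨q, l', j⟩ := b; rfl
          | some h =>
            cases hb : pvBest (idx + 1) rest with
            | none => rfl
            | some b => obtain ⟨q, l', j⟩ := b; rfl
      · rw [if_neg (fun h' => hc ⟨h'.1, h'.2.1⟩), if_neg (fun h' => hc ⟨h'.2.1, h'.2.2⟩)]
        exact ih (idx + 1) hp status lat fu fui hinv

lemma pvFU_eq_firstUnknown : ∀ (xs : List String) (idx : Int),
    pvBest idx xs = none → pvFU idx xs = pvFirstUnknown idx xs := by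
  intro xs
  induction xs with
  | nil => intro idx _; rfl
  | cons v rest ih =>
    intro idx hb
    rw [pvBest] at hb
    cases hg : pvPriority.get? v with
    | some pr =>
      obtain ⟨p, l⟩ := pr
      rw [hg] at hb
      cases hb' : pvBest (idx + 1) rest with
      | none => rw [hb'] at hb; dsimp only at hb; simp at hb
      | some b => obtain ⟨q, l', j⟩ := b; rw [hb'] at hb; dsimp only at hb; by_cases h : p < q <;> simp [h] at hb
    | none =>
      rw [hg] at hb
      dsimp only at hb
      rw [pvFU, pvFirstUnknown]
      by_cases hc : v ≠ "" ∧ PySem.Str.strip v ≠ ""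
      · rw [if_pos ⟨hg, hc.1, hc.2⟩, if_pos hc]
      · rw [if_neg (fun h' => hc ⟨h'.2.1, h'.2.2⟩), if_neg hc]
        exact ih (idx + 1) hb

lemma pvKeyIdxs_lt : ∀ (xs : List String) (idx : Int) (k : String) (j : Int),
    j ∈ pvKeyIdxs idx k xs → idx ≤ j := by
  intro xs
  induction xs with
  | nil => intro idx k j h; simp [pvKeyIdxs] at h
  | cons v rest ih =>
    intro idx k j h
    rw [pvKeyIdxs] at h
    by_cases hv : v = k
    · rw [if_pos hv] at h
      rcases List.mem_cons.mp h with rfl | h'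
      · omega
      · have := ih (idx + 1) k j h'; omega
    · rw [if_neg hv] at h
      have := ih (idx + 1) k j h; omega

lemma pvML_cons {idx : Int} {t : List Int} (h : ∀ j ∈ t, idx < j) :
    PySem.List.max? (idx :: t) (fun i => i) =
      match PySem.List.max? t (fun i => i) with
      | none => some idx
      | some m => some m := by
  cases t with
  | nil => rfl
  | cons x t' =>
    rw [PySem.List.max?_id_cons, PySem.List.max?_id_cons]
    have hx : idx ≤ x := le_of_lt (h x (List.mem_cons_self))
    simp [List.foldl_cons, max_eq_right hx]

lemma pvBest_char : ∀ (xs : List String) (idx : Int),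
    pvBest idx xs =
      match PySem.List.max? (pvKeyIdxs idx "1" xs) (fun i => i) with
      | some m => some (1, "ขายแล้ว", m)
      | none =>
        match PySem.List.max? (pvKeyIdxs idx "6" xs) (fun i => i) with
        | some m => some (2, "ถอนการยึด", m)
        | none =>
          match PySem.List.max? (pvKeyIdxs idx "0" xs) (fun i => i) with
          | some m => some (3, "ยังไม่ขาย", m)
          | none =>
            match PySem.List.max? (pvKeyIdxs idx "3" xs) (fun i => i) with
            | some m => some (4, "งดขายไม่มีผู้สู้ราคา", m)
            | none =>
              match PySem.List.max? (pvKeyIdxs idx "10" xs) (fun i => i) with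
              | some m => some (5, "งดขาย", m)
              | none => none := by
  intro xs
  induction xs with
  | nil => intro idx; rfl
  | cons v rest ih =>
    intro idx
    have hlt : ∀ (k : String) (j : Int), j ∈ pvKeyIdxs (idx + 1) k rest → idx < j := by
      intro k j hj
      have := pvKeyIdxs_lt rest (idx + 1) k j hj
      omega
    rw [pvBest, pvGet_char v, ih (idx + 1)]
    by_cases h1 : v = "1"
    · subst h1
      simp only [pvKeyIdxs, String.reduceEq, reduceIte]
      rw [pvML_cons (hlt "1")]
      cases hm : PySem.List.max? (pvKeyIdxs (idx + 1) "1" rest) (fun i => i) with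
      | some m => rfl
      | none =>
        cases hm6 : PySem.List.max? (pvKeyIdxs (idx + 1) "6" rest) (fun i => i) with
        | some m => rfl
        | none =>
          cases hm0 : PySem.List.max? (pvKeyIdxs (idx + 1) "0" rest) (fun i => i) with
          | some m => rfl
          | none =>
            cases hm3 : PySem.List.max? (pvKeyIdxs (idx + 1) "3" rest) (fun i => i) with
            | some m => rfl
            | none =>
              cases hm10 : PySem.List.max? (pvKeyIdxs (idx + 1) "10" rest) (fun i => i) with
              | some m => rfl
              | none => rfl
    · by_cases h6 : v = "6"
      · subst h6
        simp only [pvKeyIdxs, String.reduceEq, reduceIte]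
        rw [pvML_cons (hlt "6")]
        cases hm : PySem.List.max? (pvKeyIdxs (idx + 1) "1" rest) (fun i => i) with
        | some m => rfl
        | none =>
          cases hm6 : PySem.List.max? (pvKeyIdxs (idx + 1) "6" rest) (fun i => i) with
          | some m => rfl
          | none =>
            cases hm0 : PySem.List.max? (pvKeyIdxs (idx + 1) "0" rest) (fun i => i) with
            | some m => rfl
            | none =>
              cases hm3 : PySem.List.max? (pvKeyIdxs (idx + 1) "3" rest) (fun i => i) with
              | some m => rfl
              | none =>
                cases hm10 : PySem.List.max? (pvKeyIdxs (idx + 1) "10" rest) (fun i => i) with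
                | some m => rfl
                | none => rfl
      · by_cases h0 : v = "0"
        · subst h0
          simp only [pvKeyIdxs, String.reduceEq, reduceIte]
          rw [pvML_cons (hlt "0")]
          cases hm : PySem.List.max? (pvKeyIdxs (idx + 1) "1" rest) (fun i => i) with
          | some m => rfl
          | none =>
            cases hm6 : PySem.List.max? (pvKeyIdxs (idx + 1) "6" rest) (fun i => i) with
            | some m => rfl
            | none =>
              cases hm0 : PySem.List.max? (pvKeyIdxs (idx + 1) "0" rest) (fun i => i) with
              | some m => rfl
              | none =>
                cases hm3 : PySem.List.max? (pvKeyIdxs (idx + 1) "3" rest) (fun i => i) with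
                | some m => rfl
                | none =>
                  cases hm10 : PySem.List.max? (pvKeyIdxs (idx + 1) "10" rest) (fun i => i) with
                  | some m => rfl
                  | none => rfl
        · by_cases h3 : v = "3"
          · subst h3
            simp only [pvKeyIdxs, String.reduceEq, reduceIte]
            rw [pvML_cons (hlt "3")]
            cases hm : PySem.List.max? (pvKeyIdxs (idx + 1) "1" rest) (fun i => i) with
            | some m => rfl
            | none =>
              cases hm6 : PySem.List.max? (pvKeyIdxs (idx + 1) "6" rest) (fun i => i) with
              | some m => rfl
              | none =>
                cases hm0 : PySem.List.max? (pvKeyIdxs (idx + 1) "0" rest) (fun i => i) with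
                | some m => rfl
                | none =>
                  cases hm3 : PySem.List.max? (pvKeyIdxs (idx + 1) "3" rest) (fun i => i) with
                  | some m => rfl
                  | none =>
                    cases hm10 : PySem.List.max? (pvKeyIdxs (idx + 1) "10" rest) (fun i => i) with
                    | some m => rfl
                    | none => rfl
          · by_cases h10 : v = "10"
            · subst h10
              simp only [pvKeyIdxs, String.reduceEq, reduceIte]
              rw [pvML_cons (hlt "10")]
              cases hm : PySem.List.max? (pvKeyIdxs (idx + 1) "1" rest) (fun i => i) with
              | some m => rfl
              | none =>
                cases hm6 : PySem.List.max? (pvKeyIdxs (idx + 1) "6" rest) (fun i => i) with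
                | some m => rfl
                | none =>
                  cases hm0 : PySem.List.max? (pvKeyIdxs (idx + 1) "0" rest) (fun i => i) with
                  | some m => rfl
                  | none =>
                    cases hm3 : PySem.List.max? (pvKeyIdxs (idx + 1) "3" rest) (fun i => i) with
                    | some m => rfl
                    | none =>
                      cases hm10 : PySem.List.max? (pvKeyIdxs (idx + 1) "10" rest) (fun i => i) with
                      | some m => rfl
                      | none => rfl
            · simp only [pvKeyIdxs, if_neg h1, if_neg h6, if_neg h0, if_neg h3, if_neg h10]

-- ===== VERDICT (by name: the statement is the Claim_ definition above) =====
theorem determine_sale_status_spec : Claim_equal_determine_sale_status := by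
  intro xs _
  unfold Spec_determine_sale_status determine_sale_status determine_sale_status_alt
  rw [pvLoopA_eq xs 1 none "unknown" none none none (by rintro h ⟨⟩)]
  rw [pvBest_char xs 1]
  simp only [pvTryKeys]
  cases hm : PySem.List.max? (pvKeyIdxs 1 "1" xs) (fun i => i) with
  | some m => rfl
  | none =>
    cases hm6 : PySem.List.max? (pvKeyIdxs 1 "6" xs) (fun i => i) with
    | some m => rfl
    | none =>
      cases hm0 : PySem.List.max? (pvKeyIdxs 1 "0" xs) (fun i => i) with
      | some m => rfl
      | none =>
        cases hm3 : PySem.List.max? (pvKeyIdxs 1 "3" xs) (fun i => i) with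
        | some m => rfl
        | none =>
          cases hm10 : PySem.List.max? (pvKeyIdxs 1 "10" xs) (fun i => i) with
          | some m => rfl
          | none =>
            have hb : pvBest 1 xs = none := by
              rw [pvBest_char xs 1, hm, hm6, hm0, hm3, hm10]
            rw [pvFU_eq_firstUnknown xs 1 hb]
            cases hu : pvFirstUnknown 1 xs with
            | none => rfl
            | some u => obtain ⟨w, i⟩ := u; rfl
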